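-- pv_equiv track=rewrite | github.com/Hamulda/DeepResearchTool | src/scrapers/peptide_research_scraper.py | _classify_research_domain
-- ===== SOURCE A (Python) =====
-- from typing import Any
--
-- def _classify_research_domain(result: dict[str, Any]) -> str:
--     """Classify the research domain of the peptide"""
--     content = result.get("content", "").lower()
--     title = result.get("title", "").lower()
--
--     combined_text = f"{title} {content}"
--
--     if any(
--         term in combined_text
--         for term in ["growth hormone", "gh", "igf-1", "muscle", "anti-aging"]
--     ):
--         return "growth_hormone_research"
--     if any(term in combined_text for term in ["healing", "repair", "wound", "regeneration"]):
--         return "tissue_repair"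
--     if any(term in combined_text for term in ["cancer", "tumor", "oncology", "anticancer"]):
--         return "oncology"
--     if any(term in combined_text for term in ["antimicrobial", "antibiotic", "infection"]):
--         return "antimicrobial"
--     if any(term in combined_text for term in ["cosmetic", "skin", "tanning", "beauty"]):
--         return "cosmetic"
--     if any(
--         term in combined_text for term in ["hormone", "endocrine", "oxytocin", "vasopressin"]
--     ):
--         return "endocrinology"
--     return "general_peptide_research"
-- ===== SOURCE B (Python) =====
-- from typing import Any
--
-- _DOMAINS = [
--     "growth_hormone_research",
--     "tissue_repair",
--     "oncology",
--     "antimicrobial",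
--     "cosmetic",
--     "endocrinology",
--     "general_peptide_research",  # fallback: priority past every keyword
-- ]
--
-- # Flat keyword -> priority map (priority = index of its domain in _DOMAINS).
-- _KEYWORD_PRIORITY = {
--     "growth hormone": 0, "gh": 0, "igf-1": 0, "muscle": 0, "anti-aging": 0,
--     "healing": 1, "repair": 1, "wound": 1, "regeneration": 1,
--     "cancer": 2, "tumor": 2, "oncology": 2, "anticancer": 2,
--     "antimicrobial": 3, "antibiotic": 3, "infection": 3,
--     "cosmetic": 4, "skin": 4, "tanning": 4, "beauty": 4,
--     "hormone": 5, "endocrine": 5, "oxytocin": 5, "vasopressin": 5,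
-- }
--
-- def _classify_research_domain(result: dict[str, Any]) -> str:
--     """Classify the research domain: scan ALL keywords, select the minimal priority."""
--     combined_text = f"{result.get('title', '').lower()} {result.get('content', '').lower()}"
--     best = min(
--         (prio for kw, prio in _KEYWORD_PRIORITY.items() if kw in combined_text),
--         default=len(_DOMAINS) - 1,
--     )
--     return _DOMAINS[best]
-- ===== Notes on version B (the rewrite author's own statement) =====
-- stated objective: alternative
-- what changed: Replaces the ordered six-branch short-circuiting if-chain with a flat keyword->priority map: B scans all 21 keywords once, takes the minimum priority among matched keywords (default = fallback index) and indexes a domain-name list; correct because the first branch that fires in A is exactly the matched domain of minimal index.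
import Mathlib
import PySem

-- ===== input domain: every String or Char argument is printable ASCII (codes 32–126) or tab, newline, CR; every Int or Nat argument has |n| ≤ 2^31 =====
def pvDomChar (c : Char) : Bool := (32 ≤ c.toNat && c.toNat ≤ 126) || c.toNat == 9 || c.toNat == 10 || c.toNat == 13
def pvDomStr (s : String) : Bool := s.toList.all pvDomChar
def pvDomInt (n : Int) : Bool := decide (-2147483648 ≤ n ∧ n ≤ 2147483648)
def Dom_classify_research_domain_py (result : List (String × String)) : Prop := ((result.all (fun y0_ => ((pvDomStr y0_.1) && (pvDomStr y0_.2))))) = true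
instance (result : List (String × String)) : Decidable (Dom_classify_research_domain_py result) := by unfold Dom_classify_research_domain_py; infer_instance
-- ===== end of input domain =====

-- B replaces A's ordered short-circuiting if-chain by a flat keyword→priority map:
-- scan all keywords, take the minimal matched priority, index a domain list; same value everywhere.

-- ===== PORT A =====
def classify_research_domain_py (result : List (String × String)) : String :=
  let content := PySem.Str.lower (PySem.Dict.getD (PySem.Dict.mk result) "content" "")
  let title := PySem.Str.lower (PySem.Dict.getD (PySem.Dict.mk result) "title" "")
  let combined_text := title ++ " " ++ content
  if ["growth hormone", "gh", "igf-1", "muscle", "anti-aging"].any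
      (fun term => PySem.Str.isIn term combined_text) then "growth_hormone_research"
  else if ["healing", "repair", "wound", "regeneration"].any
      (fun term => PySem.Str.isIn term combined_text) then "tissue_repair"
  else if ["cancer", "tumor", "oncology", "anticancer"].any
      (fun term => PySem.Str.isIn term combined_text) then "oncology"
  else if ["antimicrobial", "antibiotic", "infection"].any
      (fun term => PySem.Str.isIn term combined_text) then "antimicrobial"
  else if ["cosmetic", "skin", "tanning", "beauty"].any
      (fun term => PySem.Str.isIn term combined_text) then "cosmetic"
  else if ["hormone", "endocrine", "oxytocin", "vasopressin"].any
      (fun term => PySem.Str.isIn term combined_text) then "endocrinology"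
  else "general_peptide_research"

-- ===== PORT B =====
def kwDomainNames : List String :=
  [ "growth_hormone_research", "tissue_repair", "oncology",
    "antimicrobial", "cosmetic", "endocrinology", "general_peptide_research" ]

def pvKeywordPriority : List (String × Nat) :=
  [ ("growth hormone", 0), ("gh", 0), ("igf-1", 0), ("muscle", 0), ("anti-aging", 0),
    ("healing", 1), ("repair", 1), ("wound", 1), ("regeneration", 1),
    ("cancer", 2), ("tumor", 2), ("oncology", 2), ("anticancer", 2),
    ("antimicrobial", 3), ("antibiotic", 3), ("infection", 3),
    ("cosmetic", 4), ("skin", 4), ("tanning", 4), ("beauty", 4),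
    ("hormone", 5), ("endocrine", 5), ("oxytocin", 5), ("vasopressin", 5) ]

def classify_research_domain_py_alt (result : List (String × String)) : String :=
  let combined_text :=
    PySem.Str.lower (PySem.Dict.getD (PySem.Dict.mk result) "title" "") ++ " " ++
      PySem.Str.lower (PySem.Dict.getD (PySem.Dict.mk result) "content" "")
  -- min((prio for kw, prio in _KEYWORD_PRIORITY.items() if kw in combined_text), default=6)
  let best :=
    (((pvKeywordPriority.filter (fun p => PySem.Str.isIn p.1 combined_text)).map Prod.snd)).foldl min 6
  kwDomainNames.getD best ""   -- _DOMAINS[best]; best ≤ 6 always, so the default is never used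

-- ===== PRECONDITION & SPEC =====
def Spec_classify_research_domain_py (result : List (String × String)) (out : String) : Prop := out = classify_research_domain_py_alt result
instance (result : List (String × String)) (out : String) : Decidable (Spec_classify_research_domain_py result out) := by unfold Spec_classify_research_domain_py; infer_instance

-- ===== CLAIM (what is proved, stated in full; the proofs are below) =====
def Claim_equal_classify_research_domain_py : Prop := ∀ (result : List (String × String)), Dom_classify_research_domain_py result → Spec_classify_research_domain_py result (classify_research_domain_py result)

-- ===== LEMMAS AND PROOFS =====

-- one keyword group, all with the same priority i: its contribution to the min-fold
theorem pv_group_fold (ts : List String) (i a : Nat) (p : String → Bool) :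
    ((((ts.map (fun s => (s, i))).filter (fun q => p q.1)).map Prod.snd)).foldl min a
      = if ts.any p then min a i else a := by
  induction ts generalizing a with
  | nil => simp
  | cons t ts ih =>
      by_cases h : p t <;> simp [h, ih]

set_option maxHeartbeats 2000000 in
theorem pv_core (t : String) :
    (if ["growth hormone", "gh", "igf-1", "muscle", "anti-aging"].any
        (fun term => PySem.Str.isIn term t) then "growth_hormone_research"
     else if ["healing", "repair", "wound", "regeneration"].any
        (fun term => PySem.Str.isIn term t) then "tissue_repair"
     else if ["cancer", "tumor", "oncology", "anticancer"].any
        (fun term => PySem.Str.isIn term t) then "oncology"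
     else if ["antimicrobial", "antibiotic", "infection"].any
        (fun term => PySem.Str.isIn term t) then "antimicrobial"
     else if ["cosmetic", "skin", "tanning", "beauty"].any
        (fun term => PySem.Str.isIn term t) then "cosmetic"
     else if ["hormone", "endocrine", "oxytocin", "vasopressin"].any
        (fun term => PySem.Str.isIn term t) then "endocrinology"
     else "general_peptide_research")
    = kwDomainNames.getD
        ((((pvKeywordPriority.filter (fun p => PySem.Str.isIn p.1 t)).map Prod.snd)).foldl min 6) "" := by
  have hflat : pvKeywordPriority =
      (["growth hormone", "gh", "igf-1", "muscle", "anti-aging"].map (fun s => (s, 0)))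
      ++ (["healing", "repair", "wound", "regeneration"].map (fun s => (s, 1)))
      ++ (["cancer", "tumor", "oncology", "anticancer"].map (fun s => (s, 2)))
      ++ (["antimicrobial", "antibiotic", "infection"].map (fun s => (s, 3)))
      ++ (["cosmetic", "skin", "tanning", "beauty"].map (fun s => (s, 4)))
      ++ (["hormone", "endocrine", "oxytocin", "vasopressin"].map (fun s => (s, 5))) := rfl
  rw [hflat]
  simp only [List.filter_append, List.map_append, List.foldl_append,
    pv_group_fold (p := fun s => PySem.Str.isIn s t)]
  generalize (["growth hormone", "gh", "igf-1", "muscle", "anti-aging"].any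
      (fun s => PySem.Str.isIn s t) : Bool) = g0
  generalize (["healing", "repair", "wound", "regeneration"].any
      (fun s => PySem.Str.isIn s t) : Bool) = g1
  generalize (["cancer", "tumor", "oncology", "anticancer"].any
      (fun s => PySem.Str.isIn s t) : Bool) = g2
  generalize (["antimicrobial", "antibiotic", "infection"].any
      (fun s => PySem.Str.isIn s t) : Bool) = g3
  generalize (["cosmetic", "skin", "tanning", "beauty"].any
      (fun s => PySem.Str.isIn s t) : Bool) = g4
  generalize (["hormone", "endocrine", "oxytocin", "vasopressin"].any
      (fun s => PySem.Str.isIn s t) : Bool) = g5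
  cases g0 <;> cases g1 <;> cases g2 <;> cases g3 <;> cases g4 <;> cases g5 <;> rfl

-- ===== VERDICT (by name: the statement is the Claim_ definition above) =====
theorem classify_research_domain_py_spec : Claim_equal_classify_research_domain_py := by
  intro result _
  unfold Spec_classify_research_domain_py classify_research_domain_py classify_research_domain_py_alt
  exact pv_core _
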